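-- pv_equiv track=rewrite | github.com/Gi1ia/TechNoteBook | Algorithm/9907_Smallest_Square_Sum.py | smallest_square
-- ===== SOURCE A (Python) =====
-- def smallest_square(matrix, target):
--     """
--     :type matrix: List[List[int]]
--     :return: List[List[int]]; stands for two points
--     """
--     if not matrix or not matrix[0]:
--         return [[0, 0], [0, 0]]
--
--     height, width = len(matrix), len(matrix[0])
--     N = min(height, width)
--     rectangle_sum = [[0 for _ in range(width + 1)] for _ in range(height + 1)]
--
--     # cumulative sum
--     for i in range(height):
--         for j in range(width):
--             rectangle_sum[i + 1][j + 1] = rectangle_sum[i][j + 1] + \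
--                 rectangle_sum[i + 1][j] - rectangle_sum[i][j] + matrix[i][j]
--
--     for step in range(1, N + 1): # square side length
--         for i in range(step, height + 1):
--             for j in range(step, width + 1):
--                 current = rectangle_sum[i][j] - rectangle_sum[i - step][j] - rectangle_sum[i][j - step]\
--                     + rectangle_sum[i - step][j - step]
--                 if current >= target:
--                     return [[i - step, j - step], [i - 1, j - 1]]
--
--     return [[0, 0], [0, 0]]
-- ===== SOURCE B (Python) =====
-- def smallest_square(matrix, target):
--     if not matrix or not matrix[0]:
--         return [[0, 0], [0, 0]]
--
--     height, width = len(matrix), len(matrix[0])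
--     N = min(height, width)
--
--     # per-row 1D prefix sums: rowpre[r][j] = sum of matrix[r][0:j]
--     rowpre = []
--     for row in matrix:
--         acc = [0]
--         t = 0
--         for c in range(width):
--             t += row[c]
--             acc.append(t)
--         rowpre.append(acc)
--
--     # flat lazy candidate stream in A's search order: (side, top-left row, top-left col)
--     cands = ((s, r, c)
--              for s in range(1, N + 1)
--              for r in range(height - s + 1)
--              for c in range(width - s + 1))
--
--     for s, r, c in cands:
--         total = 0
--         for rr in range(r, r + s):
--             total += rowpre[rr][c + s] - rowpre[rr][c]
--         if total >= target:
--             return [[r, c], [r + s - 1, c + s - 1]]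
--
--     return [[0, 0], [0, 0]]
-- ===== Notes on version B (the rewrite author's own statement) =====
-- stated objective: alternative
-- what changed: Replaces the 2D inclusion-exclusion prefix table and triple search loop with per-row 1D prefix sums plus a single flat lazy stream of (side, top-left) candidates, each checked by a vertical accumulation over its rows.
import Mathlib
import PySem

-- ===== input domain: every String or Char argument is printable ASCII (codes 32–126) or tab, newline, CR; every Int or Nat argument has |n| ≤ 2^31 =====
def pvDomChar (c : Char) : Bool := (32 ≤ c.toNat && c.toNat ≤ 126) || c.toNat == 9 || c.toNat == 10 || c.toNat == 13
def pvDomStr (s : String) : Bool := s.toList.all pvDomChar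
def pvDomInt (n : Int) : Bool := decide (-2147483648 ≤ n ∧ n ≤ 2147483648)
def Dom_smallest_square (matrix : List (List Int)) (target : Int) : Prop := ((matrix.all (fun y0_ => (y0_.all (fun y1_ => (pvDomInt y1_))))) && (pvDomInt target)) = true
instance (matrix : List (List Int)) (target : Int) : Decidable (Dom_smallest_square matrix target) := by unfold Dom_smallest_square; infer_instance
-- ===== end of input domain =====

-- B replaces A's 2D inclusion-exclusion table and triple search loop by per-row 1D prefix
-- sums plus one flat (side, top-left) candidate stream, each candidate checked by a
-- vertical accumulation over its rows (alternative decomposition, same values).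


-- ===== PORT A =====
-- matrix[i][j] for in-range indices (Pre_ guarantees the Python indexings succeed)
def pvGetM (m : List (List Int)) (i j : Nat) : Int := (m.getD i []).getD j 0

-- the filled table rectangle_sum: rectSum m i j = rectangle_sum[i][j], via A's recurrence
def rectSum (m : List (List Int)) : Nat → Nat → Int
  | 0, _ => 0
  | _+1, 0 => 0
  | i+1, j+1 => rectSum m i (j+1) + rectSum m (i+1) j - rectSum m i j + pvGetM m i j

def smallest_square (matrix : List (List Int)) (target : Int) : List (List Int) :=
  if matrix = [] ∨ matrix.headD [] = [] then [[0, 0], [0, 0]]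
  else
    let height := matrix.length
    let width := (matrix.headD []).length
    let N := min height width
    match (List.range' 1 N).findSome? (fun step =>
      (List.range' step (height + 1 - step)).findSome? (fun i =>
        (List.range' step (width + 1 - step)).findSome? (fun j =>
          let current := rectSum matrix i j - rectSum matrix (i - step) j
              - rectSum matrix i (j - step) + rectSum matrix (i - step) (j - step)
          if target ≤ current then
            some [[(i : Int) - step, (j : Int) - step], [(i : Int) - 1, (j : Int) - 1]]
          else none))) with
    | some res => res
    | none => [[0, 0], [0, 0]]

-- ===== PORT B =====
-- B's prefix-building loop `acc=[0]; t=0; for c in range(width): t+=row[c]; acc.append(t)`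
def pvPrefixRow (row : List Int) (width : Nat) : List Int :=
  ((List.range width).foldl
    (fun st c => (st.1 ++ [st.2 + row.getD c 0], st.2 + row.getD c 0))
    ([(0 : Int)], (0 : Int))).1

-- B's `rowpre` list (one prefix list per row)
def pvRowPres (m : List (List Int)) (width : Nat) : List (List Int) :=
  m.map (fun row => pvPrefixRow row width)

-- the flat lazy candidate stream [(s, r, c), …] in B's comprehension order
def pvCands (h w N : Nat) : List (Nat × Nat × Nat) :=
  (List.range' 1 N).flatMap (fun s =>
    (List.range (h - s + 1)).flatMap (fun r =>
      (List.range (w - s + 1)).map (fun c => (s, r, c))))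

-- B's vertical accumulation `total += rowpre[rr][c+s] - rowpre[rr][c]`
def pvVertSum (pre : List (List Int)) (r c s : Nat) : Int :=
  (List.range' r s).foldl
    (fun acc rr => acc + (pre.getD rr []).getD (c + s) 0 - (pre.getD rr []).getD c 0) 0

def smallest_square_alt (matrix : List (List Int)) (target : Int) : List (List Int) :=
  if matrix = [] ∨ matrix.headD [] = [] then [[0, 0], [0, 0]]
  else
    let rowpre := pvRowPres matrix (matrix.headD []).length
    match (pvCands matrix.length (matrix.headD []).length
        (min matrix.length (matrix.headD []).length)).find?
        (fun t => target ≤ pvVertSum rowpre t.2.1 t.2.2 t.1) with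
    | some t =>
        [[(t.2.1 : Int), (t.2.2 : Int)], [(t.2.1 : Int) + t.1 - 1, (t.2.2 : Int) + t.1 - 1]]
    | none => [[0, 0], [0, 0]]

-- ===== PRECONDITION & SPEC =====
-- Pre_ excludes ragged matrices with some row shorter than the first row: there the
-- Python A raises IndexError while filling the prefix table (it never returns).
def Pre_smallest_square (matrix : List (List Int)) (target : Int) : Prop :=
  ∀ row ∈ matrix, (matrix.headD []).length ≤ row.length
instance (matrix : List (List Int)) (target : Int) : Decidable (Pre_smallest_square matrix target) := by unfold Pre_smallest_square; infer_instance
def pvWitness_smallest_square : List (List Int) × Int := ([[1, 2], [3, 4]], 5)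

def Spec_smallest_square (matrix : List (List Int)) (target : Int) (out : List (List Int)) : Prop := out = smallest_square_alt matrix target
instance (matrix : List (List Int)) (target : Int) (out : List (List Int)) : Decidable (Spec_smallest_square matrix target out) := by unfold Spec_smallest_square; infer_instance

-- ===== CLAIM (what is proved, stated in full; the proofs are below) =====
def Claim_equal_smallest_square : Prop := ∀ (matrix : List (List Int)) (target : Int), Dom_smallest_square matrix target → Pre_smallest_square matrix target → Spec_smallest_square matrix target (smallest_square matrix target)

-- ===== LEMMAS AND PROOFS =====

lemma findSome?_congr {α β : Type} (l : List α) (f g : α → Option β)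
    (h : ∀ x ∈ l, f x = g x) : l.findSome? f = l.findSome? g := by
  induction l with
  | nil => rfl
  | cons a t ih =>
    simp only [List.findSome?]
    rw [h a (by simp)]
    cases g a with
    | none => exact ih (fun x hx => h x (by simp [hx]))
    | some b => rfl

lemma findSome?_flatMap {α β γ : Type} (l : List α) (g : α → List β) (f : β → Option γ) :
    (l.flatMap g).findSome? f = l.findSome? (fun x => (g x).findSome? f) := by
  induction l with
  | nil => rfl
  | cons a t ih =>
    rw [List.flatMap_cons, List.findSome?_append, ih, List.findSome?_cons]
    cases (g a).findSome? f <;> simp [Option.or]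

lemma map_find? {α β : Type} (l : List α) (p : α → Bool) (out : α → β) :
    (l.find? p).map out
      = l.findSome? (fun x => if p x then some (out x) else none) := by
  induction l with
  | nil => rfl
  | cons a t ih =>
    rw [List.find?_cons, List.findSome?_cons]
    cases hp : p a <;> simp [*]

-- per-row prefix sums (proof-side view of rectSum's columns)
def rowPreRow (row : List Int) : Nat → Int
  | 0 => 0
  | j+1 => rowPreRow row j + row.getD j 0

def rowPre (m : List (List Int)) (r : Nat) (j : Nat) : Int := rowPreRow (m.getD r []) j

lemma rowPre_zero (m : List (List Int)) (r : Nat) : rowPre m r 0 = 0 := rfl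
lemma rowPre_succ (m : List (List Int)) (r j : Nat) :
    rowPre m r (j + 1) = rowPre m r j + pvGetM m r j := rfl

-- the fold state of B's prefix loop, characterised
lemma prefixRow_state (row : List Int) : ∀ w,
    (List.range w).foldl
      (fun st c => (st.1 ++ [st.2 + row.getD c 0], st.2 + row.getD c 0))
      ([(0 : Int)], (0 : Int))
    = ((List.range (w + 1)).map (rowPreRow row), rowPreRow row w) := by
  intro w
  induction w with
  | zero => rfl
  | succ w ih =>
    rw [List.range_succ, List.foldl_append, ih]
    simp only [List.foldl_cons, List.foldl_nil]
    simp [show List.range (w + 1 + 1) = List.range (w + 1) ++ [w + 1] from List.range_succ,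
      rowPreRow]

lemma getD_prefixRow (row : List Int) (w j : Nat) (h : j ≤ w) :
    (pvPrefixRow row w).getD j 0 = rowPreRow row j := by
  unfold pvPrefixRow
  rw [prefixRow_state]
  rw [List.getD_eq_getElem?_getD, List.getElem?_map, List.getElem?_range (by omega)]
  rfl

-- the 2D table is the column-stack of the row prefixes
lemma rect_eq (m : List (List Int)) : ∀ i j,
    rectSum m i j = ((List.range i).map (fun r => rowPre m r j)).sum := by
  intro i
  induction i with
  | zero => intro j; simp [rectSum]
  | succ i ih =>
    intro j
    induction j with
    | zero =>
      rw [rectSum]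
      simp [rowPre_zero]
    | succ j ihj =>
      rw [rectSum, ih, ih, ihj]
      simp only [List.range_succ, List.map_append, List.sum_append, List.map_cons,
        List.map_nil, List.sum_cons, List.sum_nil, rowPre_succ]
      ring

-- four-corner difference = sum of row-segment sums over the square's rows
lemma corner_eq (m : List (List Int)) (step i j : Nat) (hi : step ≤ i) :
    rectSum m i j - rectSum m (i - step) j - rectSum m i (j - step)
      + rectSum m (i - step) (j - step)
    = ((List.range' (i - step) (i - (i - step))).map
        (fun r => rowPre m r j - rowPre m r (j - step))).sum := by
  have hsplit : ∀ (k : Nat → Int), (List.range i).map k = (List.range (i - step)).map k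
      ++ (List.range' (i - step) step).map k := by
    intro k
    rw [← List.map_append]
    congr 1
    rw [List.range_eq_range', List.range_eq_range']
    have h := @List.range'_append_1 0 (i - step) step
    rw [Nat.zero_add] at h
    rw [h]
    congr 1
    omega
  have hlen : i - (i - step) = step := by omega
  rw [rect_eq, rect_eq, rect_eq, rect_eq, hlen, hsplit, hsplit, List.sum_append, List.sum_append]
  have : ∀ (f g : Nat → Int) (l : List Nat),
      (l.map (fun r => f r - g r)).sum = (l.map f).sum - (l.map g).sum := by
    intro f g l
    induction l with
    | nil => simp
    | cons a t ih => simp [ih]; ring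
  rw [this]
  ring

lemma foldl_add_sum (f : Nat → Int) : ∀ (l : List Nat) (a : Int),
    l.foldl (fun acc x => acc + f x) a = a + (l.map f).sum := by
  intro l
  induction l with
  | nil => simp
  | cons b t ih => intro a; simp [List.foldl_cons, ih]; ring

-- B's vertical accumulation = sum of row-prefix differences
lemma vertSum_eq (pre : List (List Int)) (r c s : Nat) :
    pvVertSum pre r c s
      = ((List.range' r s).map
          (fun rr => (pre.getD rr []).getD (c + s) 0 - (pre.getD rr []).getD c 0)).sum := by
  unfold pvVertSum
  rw [show (fun (acc : Int) (rr : Nat) =>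
        acc + (pre.getD rr []).getD (c + s) 0 - (pre.getD rr []).getD c 0)
      = (fun acc rr =>
        acc + ((pre.getD rr []).getD (c + s) 0 - (pre.getD rr []).getD c 0)) from by
    funext acc rr; ring]
  rw [foldl_add_sum]
  ring

-- A's current at (step, i, j) = B's vertical prefix-difference sum at (i-step, j-step, step)
lemma current_eq (m : List (List Int)) (w step i j : Nat) (hi : step ≤ i) (hj : step ≤ j)
    (hjw : j ≤ w) (hih : i ≤ m.length) :
    rectSum m i j - rectSum m (i - step) j - rectSum m i (j - step)
      + rectSum m (i - step) (j - step)
    = pvVertSum (pvRowPres m w) (i - step) (j - step) step := by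
  rw [corner_eq m step i j hi]
  have hlen : i - (i - step) = step := by omega
  rw [hlen, vertSum_eq]
  apply congrArg
  apply List.map_congr_left
  intro rr hrr
  have hrm : rr < m.length := by
    have := List.mem_range'_1.mp hrr; omega
  have hpre : (pvRowPres m w).getD rr [] = pvPrefixRow (m.getD rr []) w := by
    unfold pvRowPres
    rw [List.getD_eq_getElem?_getD, List.getElem?_map,
      List.getElem?_eq_getElem (by omega : rr < m.length)]
    simp [List.getD_eq_getElem?_getD, List.getElem?_eq_getElem (by omega : rr < m.length)]
  have h1 : (j - step) + step = j := by omega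
  rw [hpre, h1, getD_prefixRow _ _ _ hjw, getD_prefixRow _ _ _ (by omega : j - step ≤ w)]
  rfl

-- ===== VERDICT (by name: the statement is the Claim_ definition above) =====
theorem smallest_square_spec : Claim_equal_smallest_square := by
  intro matrix target _ _
  unfold Spec_smallest_square smallest_square smallest_square_alt
  by_cases hg : matrix = [] ∨ matrix.headD [] = []
  · rw [if_pos hg, if_pos hg]
  · simp only [hg, if_false]
    have key : (List.range' 1 (min matrix.length (matrix.headD []).length)).findSome?
        (fun step =>
          (List.range' step (matrix.length + 1 - step)).findSome? (fun i =>
            (List.range' step ((matrix.headD []).length + 1 - step)).findSome? (fun j =>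
              let current := rectSum matrix i j - rectSum matrix (i - step) j
                  - rectSum matrix i (j - step) + rectSum matrix (i - step) (j - step)
              if target ≤ current then
                some [[(i : Int) - step, (j : Int) - step], [(i : Int) - 1, (j : Int) - 1]]
              else none)))
      = ((pvCands matrix.length (matrix.headD []).length
            (min matrix.length (matrix.headD []).length)).find?
          (fun t => decide (target ≤ pvVertSum
            (pvRowPres matrix (matrix.headD []).length) t.2.1 t.2.2 t.1))).map
          (fun t => [[(t.2.1 : Int), (t.2.2 : Int)],
            [(t.2.1 : Int) + t.1 - 1, (t.2.2 : Int) + t.1 - 1]]) := by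
      rw [map_find?]
      unfold pvCands
      rw [findSome?_flatMap]
      apply findSome?_congr
      intro s hs
      have hsb : 1 ≤ s ∧ s ≤ min matrix.length (matrix.headD []).length := by
        have := List.mem_range'_1.mp hs; omega
      have hsh : s ≤ matrix.length := le_trans hsb.2 (Nat.min_le_left _ _)
      have hsw : s ≤ (matrix.headD []).length := le_trans hsb.2 (Nat.min_le_right _ _)
      rw [findSome?_flatMap]
      rw [show List.range' s (matrix.length + 1 - s)
            = (List.range (matrix.length - s + 1)).map (fun x => s + x) from by
          rw [← List.range'_eq_map_range]; congr 1; omega]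
      rw [List.findSome?_map]
      apply findSome?_congr
      intro r hr
      simp only [Function.comp_apply]
      rw [List.findSome?_map]
      rw [show List.range' s ((matrix.headD []).length + 1 - s)
            = (List.range ((matrix.headD []).length - s + 1)).map (fun x => s + x) from by
          rw [← List.range'_eq_map_range]; congr 1; omega]
      rw [List.findSome?_map]
      apply findSome?_congr
      intro c hc
      simp only [Function.comp_apply]
      have hi : s ≤ s + r := by omega
      have hj : s ≤ s + c := by omega
      have hjw : s + c ≤ (matrix.headD []).length := by
        have := List.mem_range.mp hc
        omega
      have hih : s + r ≤ matrix.length := by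
        have := List.mem_range.mp hr
        omega
      rw [current_eq matrix (matrix.headD []).length s (s + r) (s + c) hi hj hjw hih]
      have e1 : s + r - s = r := by omega
      have e2 : s + c - s = c := by omega
      rw [e1, e2]
      by_cases hle : target ≤ pvVertSum
          (pvRowPres matrix (matrix.headD []).length) r c s
      · simp only [hle, decide_true, if_pos]
        have g1 : ((s + r : Nat) : Int) - s = r := by push_cast; ring
        have g2 : ((s + c : Nat) : Int) - s = c := by push_cast; ring
        have g3 : ((s + r : Nat) : Int) - 1 = (r : Int) + s - 1 := by push_cast; ring
        have g4 : ((s + c : Nat) : Int) - 1 = (c : Int) + s - 1 := by push_cast; ring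
        rw [g1, g2, g3, g4]
      · simp only [hle, decide_false]
        rfl
    rw [key]
    cases (pvCands matrix.length (matrix.headD []).length
        (min matrix.length (matrix.headD []).length)).find?
        (fun t => decide (target ≤ pvVertSum
          (pvRowPres matrix (matrix.headD []).length) t.2.1 t.2.2 t.1)) with
    | none => rfl
    | some t => rfl
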